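-- pv_equiv track=rewrite | github.com/hotyya/control-theory | stabilization.py | form_K
-- ===== SOURCE A (Python) =====
-- n = 4
--
-- def form_K(c_h):
--     K = list()
--     for i in range(n):
--         k_temp = list()
--         for j in range(i):
--             k_temp.append(0)
--         k_temp.append(1)
--         for j in range(n - i - 1):
--             k_temp.append(c_h[j])
--         K.append(k_temp)
--
--     return K
-- ===== SOURCE B (Python) =====
-- n = 4
--
-- def form_K(c_h):
--     # Toeplitz view: one base sequence, each row is a sliding window of it
--     base = [0] * (n - 1) + [1] + [c_h[j] for j in range(n - 1)]
--     return [base[n - 1 - i : 2 * n - 1 - i] for i in range(n)]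
-- ===== Notes on version B (the rewrite author's own statement) =====
-- stated objective: simpler
-- what changed: Replaces A's per-row append loops with one Toeplitz base sequence from which each row is cut as a sliding-window slice.
import Mathlib
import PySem

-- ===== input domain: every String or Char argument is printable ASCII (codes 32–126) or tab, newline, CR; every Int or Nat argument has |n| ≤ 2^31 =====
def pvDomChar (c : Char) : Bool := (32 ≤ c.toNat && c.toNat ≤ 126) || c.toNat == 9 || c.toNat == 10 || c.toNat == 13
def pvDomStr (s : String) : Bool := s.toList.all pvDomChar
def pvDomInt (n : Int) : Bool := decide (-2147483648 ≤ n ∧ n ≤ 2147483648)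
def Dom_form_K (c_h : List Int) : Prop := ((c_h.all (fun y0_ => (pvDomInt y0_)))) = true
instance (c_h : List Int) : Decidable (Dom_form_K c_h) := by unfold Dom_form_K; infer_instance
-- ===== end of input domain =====

-- B builds one Toeplitz base row and takes sliding-window slices instead of A's per-row append loops (objective: simpler).

-- ===== PORT A =====
-- loops are folds over pyRange; c_h[j] is pyGet? (exact inside Pre_, where every accessed index is in range)
def form_K (c_h : List Int) : List (List Int) :=
  (PySem.List.pyRange 0 4 1).foldl (fun K i =>
    let k0 : List Int := (PySem.List.pyRange 0 i 1).foldl (fun k _ => k ++ [0]) []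
    let k1 := k0 ++ [1]
    let k2 := (PySem.List.pyRange 0 (4 - i - 1) 1).foldl
      (fun k j => k ++ [(PySem.List.pyGet? c_h j).getD 0]) k1
    K ++ [k2]) []

-- ===== PORT B =====
def form_K_alt (c_h : List Int) : List (List Int) :=
  let base : List Int :=
    List.replicate 3 0 ++ [1] ++
      (PySem.List.pyRange 0 3 1).map (fun j => (PySem.List.pyGet? c_h j).getD 0)
  (PySem.List.pyRange 0 4 1).map (fun i =>
    PySem.List.slice base (some (4 - 1 - i)) (some (2 * 4 - 1 - i)))

-- ===== PRECONDITION & SPEC =====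
-- Pre_ excludes lists shorter than 3, on which Python A (and B) raise IndexError at c_h[j]
def Pre_form_K (c_h : List Int) : Prop := 3 ≤ c_h.length
instance (c_h : List Int) : Decidable (Pre_form_K c_h) := by unfold Pre_form_K; infer_instance
def pvWitness_form_K : List Int := [5, -2, 7]

def Spec_form_K (c_h : List Int) (out : List (List Int)) : Prop := out = form_K_alt c_h
instance (c_h : List Int) (out : List (List Int)) : Decidable (Spec_form_K c_h out) := by unfold Spec_form_K; infer_instance

-- ===== CLAIM (what is proved, stated in full; the proofs are below) =====
def Claim_equal_form_K : Prop := ∀ (c_h : List Int), Dom_form_K c_h → Pre_form_K c_h → Spec_form_K c_h (form_K c_h)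

-- ===== LEMMAS AND PROOFS =====
theorem form_K_eq (a b c : Int) (rest : List Int) :
    form_K (a :: b :: c :: rest) = form_K_alt (a :: b :: c :: rest) := rfl

-- ===== VERDICT (by name: the statement is the Claim_ definition above) =====
theorem form_K_spec : Claim_equal_form_K := by
  intro c_h _ hpre
  unfold Spec_form_K
  match c_h, hpre with
  | a :: b :: c :: rest, _ => exact form_K_eq a b c rest
  | [], h | [_], h | [_, _], h => simp [Pre_form_K] at h
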